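-- pv_equiv track=rewrite | github.com/Ashok0336/N6-Aware-5G-Network-Enforcement-Framework | ci-scripts/yaml_files/5g_rfsimulator/automation/policy_manager.py | matches_keywords
-- ===== SOURCE A (Python) =====
-- from typing import Any, Dict, Iterable, List, Optional, Tuple
--
-- def matches_keywords(path: Optional[str], keywords: Iterable[str]) -> bool:
--     if not path:
--         return False
--     lowered_path = path.lower()
--     lowered_keywords = [keyword.lower() for keyword in keywords if str(keyword).strip()]
--     if not lowered_keywords:
--         return True
--     return any(keyword in lowered_path for keyword in lowered_keywords)
-- ===== SOURCE B (Python) =====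
-- def matches_keywords(path, keywords):
--     if not path:
--         return False
--     kws = []
--     for keyword in keywords:
--         if str(keyword).strip():
--             kws.append(keyword.lower())
--     if not kws:
--         return True
--     p = path.lower()
--     while not any(p.startswith(kw) for kw in kws):
--         if not p:
--             return False
--         p = p[1:]
--     return True
-- ===== Notes on version B (the rewrite author's own statement) =====
-- stated objective: alternative
-- what changed: Replaces A's per-keyword independent substring ('in') scans with a single explicit scan that advances one position at a time and tests every keyword as a prefix of the current suffix, with the filtered lowered-keyword list built by an explicit accumulator loop instead of a comprehension.
import Mathlib
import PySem

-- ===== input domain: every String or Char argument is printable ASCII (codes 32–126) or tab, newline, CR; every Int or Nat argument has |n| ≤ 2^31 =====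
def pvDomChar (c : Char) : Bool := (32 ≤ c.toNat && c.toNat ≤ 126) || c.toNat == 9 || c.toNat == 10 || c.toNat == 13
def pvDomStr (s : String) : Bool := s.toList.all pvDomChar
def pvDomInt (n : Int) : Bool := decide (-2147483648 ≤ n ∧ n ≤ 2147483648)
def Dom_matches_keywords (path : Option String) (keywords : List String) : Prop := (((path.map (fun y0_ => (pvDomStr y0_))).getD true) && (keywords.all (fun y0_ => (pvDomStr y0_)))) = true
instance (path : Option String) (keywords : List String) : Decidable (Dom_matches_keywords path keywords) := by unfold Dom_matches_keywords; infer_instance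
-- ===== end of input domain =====

-- B: same task, but one explicit position-advancing scan testing every keyword as a prefix
-- of each suffix, with the keyword list built by an accumulator loop (objective: alternative).

-- ===== PORT A =====
def matches_keywords (path : Option String) (keywords : List String) : Bool :=
  match path with
  | none => false
  | some s =>
    if s.toList = [] then false            -- 'if not path'
    else
      let lowered_path := PySem.Chars.lower s.toList
      let lowered_keywords :=
        (keywords.filter (fun k => PySem.Chars.strip k.toList ≠ [])).map
          (fun k => PySem.Chars.lower k.toList)
      if lowered_keywords = [] then true
      else lowered_keywords.any (fun kw => PySem.Chars.isIn kw lowered_path)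

-- ===== PORT B =====
-- the 'for keyword in keywords: … kws.append(…)' accumulator loop of Source B
def collectKws : List String → List (List Char)
  | [] => []
  | k :: rest =>
      if PySem.Chars.strip k.toList = [] then collectKws rest
      else PySem.Chars.lower k.toList :: collectKws rest

-- the 'while not any(p.startswith(kw) …): … p = p[1:]' loop of Source B
def scanKws (kws : List (List Char)) : List Char → Bool
  | [] => kws.any (fun kw => PySem.Chars.startswith [] kw)
  | c :: rest =>
      kws.any (fun kw => PySem.Chars.startswith (c :: rest) kw) || scanKws kws rest

def matches_keywords_alt (path : Option String) (keywords : List String) : Bool :=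
  match path with
  | none => false
  | some s =>
    match s.toList with
    | [] => false                          -- 'if not path'
    | c :: cs =>
      match collectKws keywords with
      | [] => true                         -- 'if not kws'
      | kw0 :: kwrest => scanKws (kw0 :: kwrest) (PySem.Chars.lower (c :: cs))

-- ===== PRECONDITION & SPEC =====
def Spec_matches_keywords (path : Option String) (keywords : List String) (out : Bool) : Prop := out = matches_keywords_alt path keywords
instance (path : Option String) (keywords : List String) (out : Bool) : Decidable (Spec_matches_keywords path keywords out) := by unfold Spec_matches_keywords; infer_instance

-- ===== CLAIM (what is proved, stated in full; the proofs are below) =====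
def Claim_equal_matches_keywords : Prop := ∀ (path : Option String) (keywords : List String), Dom_matches_keywords path keywords → Spec_matches_keywords path keywords (matches_keywords path keywords)

-- ===== LEMMAS AND PROOFS =====

-- the accumulator loop builds exactly A's filtered-and-lowered list
theorem collect_eq (keywords : List String) :
    collectKws keywords =
    (keywords.filter (fun k => PySem.Chars.strip k.toList ≠ [])).map
      (fun k => PySem.Chars.lower k.toList) := by
  induction keywords with
  | nil => rfl
  | cons k rest ih =>
    by_cases h : PySem.Chars.strip k.toList = []
    · simp [collectKws, h, ih]
    · simp [collectKws, h, ih]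

-- unfolding 'in' one step: kw occurs in c::rest iff it is a prefix there or occurs in rest
theorem isIn_step (kw : List Char) (c : Char) (rest : List Char) :
    PySem.Chars.isIn kw (c :: rest) =
    (PySem.Chars.startswith (c :: rest) kw || PySem.Chars.isIn kw rest) := by
  rw [Bool.eq_iff_iff, Bool.or_eq_true, PySem.Chars.startswith_iff,
    ← PySem.Chars.exists_prefix_drop_iff_isIn, ← PySem.Chars.exists_prefix_drop_iff_isIn]
  constructor
  · rintro ⟨j, hj⟩
    cases j with
    | zero => exact Or.inl (by simpa using hj)
    | succ j => exact Or.inr ⟨j, by simpa using hj⟩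
  · rintro (h | ⟨j, hj⟩)
    · exact ⟨0, by simpa using h⟩
    · exact ⟨j + 1, by simpa using hj⟩

theorem isIn_nil' (kw : List Char) :
    PySem.Chars.isIn kw [] = PySem.Chars.startswith [] kw := by
  rw [Bool.eq_iff_iff, PySem.Chars.startswith_iff, ← PySem.Chars.exists_prefix_drop_iff_isIn]
  constructor
  · rintro ⟨j, hj⟩; simpa using hj
  · intro h; exact ⟨0, by simpa using h⟩

-- the position-major scan equals A's keyword-major 'any … in …'
theorem scanKws_eq (kws : List (List Char)) (p : List Char) :
    scanKws kws p = kws.any (fun kw => PySem.Chars.isIn kw p) := by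
  induction p with
  | nil =>
    simp only [scanKws]
    rw [Bool.eq_iff_iff]
    simp only [List.any_eq_true, isIn_nil']
  | cons c rest ih =>
    simp only [scanKws, ih]
    rw [Bool.eq_iff_iff]
    simp only [Bool.or_eq_true, List.any_eq_true, isIn_step]
    constructor
    · rintro (⟨kw, hm, h⟩ | ⟨kw, hm, h⟩)
      · exact ⟨kw, hm, Or.inl h⟩
      · exact ⟨kw, hm, Or.inr h⟩
    · rintro ⟨kw, hm, h | h⟩
      · exact Or.inl ⟨kw, hm, h⟩
      · exact Or.inr ⟨kw, hm, h⟩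

-- ===== VERDICT (by name: the statement is the Claim_ definition above) =====
theorem matches_keywords_spec : Claim_equal_matches_keywords := by
  intro path keywords _
  unfold Spec_matches_keywords matches_keywords matches_keywords_alt
  cases path with
  | none => rfl
  | some s =>
    cases hs : s.toList with
    | nil => simp [hs]
    | cons c cs =>
      simp only [hs]
      rw [collect_eq] at *
      cases hk : (keywords.filter (fun k => PySem.Chars.strip k.toList ≠ [])).map
          (fun k => PySem.Chars.lower k.toList) with
      | nil => simp_all
      | cons kw0 kwrest =>
        simp only [if_neg (by simp : ¬(c :: cs = [])),
          if_neg (by simp : ¬(kw0 :: kwrest = []))]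
        rw [scanKws_eq]
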